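-- pv_equiv track=rewrite | github.com/Lmraza98/hello | launcher.py | _has_browser_evidence
-- ===== SOURCE A (Python) =====
-- def _has_browser_evidence(lines: list[str]) -> bool:
--     if not lines:
--         return False
--     markers = (
--         "leadpilot-bridge",
--         "browser bridge",
--         "cdp",
--         "playwright",
--         "tab_id",
--         "/tabs",
--         "navigate",
--         "snapshot",
--     )
--     for raw in lines:
--         line = str(raw).lower()
--         if any(marker in line for marker in markers):
--             return True
--     return False
-- ===== SOURCE B (Python) =====
-- def _has_browser_evidence(lines: list[str]) -> bool:
--     markers = (
--         "leadpilot-bridge",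
--         "browser bridge",
--         "cdp",
--         "playwright",
--         "tab_id",
--         "/tabs",
--         "navigate",
--         "snapshot",
--     )
--     text = "\n".join(str(raw).lower() for raw in lines)
--     return any(marker in text for marker in markers)
-- ===== Notes on version B (the rewrite author's own statement) =====
-- stated objective: faster
-- what changed: B joins all lowercased lines into one newline-separated text once and runs a single substring scan over that text per marker (markers as the outer loop), instead of A's per-line Python loop with an inner 8-marker scan and a separate empty-list guard; equivalent because no marker contains a newline.
import Mathlib
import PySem

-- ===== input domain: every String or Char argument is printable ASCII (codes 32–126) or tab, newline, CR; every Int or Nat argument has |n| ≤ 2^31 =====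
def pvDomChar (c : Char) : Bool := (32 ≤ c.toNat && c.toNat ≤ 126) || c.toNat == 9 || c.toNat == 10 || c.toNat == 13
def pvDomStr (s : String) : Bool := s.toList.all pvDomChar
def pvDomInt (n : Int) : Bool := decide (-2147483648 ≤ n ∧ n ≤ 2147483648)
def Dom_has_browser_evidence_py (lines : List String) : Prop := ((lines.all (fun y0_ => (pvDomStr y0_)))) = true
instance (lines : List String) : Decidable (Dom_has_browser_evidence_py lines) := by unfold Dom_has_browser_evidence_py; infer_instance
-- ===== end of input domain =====

-- B joins all lowercased lines into one newline-separated text and scans that once per marker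
-- (markers outer), instead of A's per-line loop with an inner marker scan; no marker contains '\n'.

-- ===== PORT A =====
-- the shared literal marker tuple
def pvMarkers : List String :=
  ["leadpilot-bridge", "browser bridge", "cdp", "playwright", "tab_id", "/tabs", "navigate", "snapshot"]

-- A's per-line loop: return True on the first line containing any marker
def goA : List String → Bool
  | [] => false
  | raw :: rest =>
    -- str(raw) on a str is the identity
    if pvMarkers.any (fun marker => PySem.Str.isIn marker (PySem.Str.lower raw)) then true
    else goA rest

def has_browser_evidence_py (lines : List String) : Bool :=
  match lines with
  | [] => false          -- `if not lines: return False`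
  | _ :: _ => goA lines

-- ===== PORT B =====
def has_browser_evidence_py_alt (lines : List String) : Bool :=
  let text := PySem.Str.join "\n" (lines.map (fun raw => PySem.Str.lower raw))
  pvMarkers.any (fun marker => PySem.Str.isIn marker text)

-- ===== PRECONDITION & SPEC =====
def Spec_has_browser_evidence_py (lines : List String) (out : Bool) : Prop := out = has_browser_evidence_py_alt lines
instance (lines : List String) (out : Bool) : Decidable (Spec_has_browser_evidence_py lines out) := by unfold Spec_has_browser_evidence_py; infer_instance

-- ===== CLAIM (what is proved, stated in full; the proofs are below) =====
def Claim_equal_has_browser_evidence_py : Prop := ∀ (lines : List String), Dom_has_browser_evidence_py lines → Spec_has_browser_evidence_py lines (has_browser_evidence_py lines)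

-- ===== LEMMAS AND PROOFS =====

-- a prefix of `a ++ c :: b` that avoids `c` is a prefix of `a`
lemma pfx_split (p a b : List Char) (c : Char) (hc : c ∉ p) (h : p <+: a ++ c :: b) : p <+: a := by
  by_cases hl : p.length ≤ a.length
  · have hp := List.prefix_iff_eq_take.mp h
    rw [List.take_append, Nat.sub_eq_zero_of_le hl, List.take_zero,
      List.append_nil] at hp
    exact hp ▸ List.take_prefix _ _
  · exfalso
    apply hc
    have hp := List.prefix_iff_eq_take.mp h
    rw [hp, List.take_append, List.take_cons (by omega)]
    simp

-- a nonempty infix of `a ++ c :: b` that avoids `c` lies in `a` or in `b`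
lemma infix_split (m a b : List Char) (c : Char) (hm : m ≠ []) (hc : c ∉ m) :
    m <:+: a ++ c :: b ↔ m <:+: a ∨ m <:+: b := by
  constructor
  · intro h
    induction a with
    | nil =>
      rcases List.infix_cons_iff.mp h with hp | hi
      · cases m with
        | nil => exact absurd rfl hm
        | cons x m' =>
          obtain ⟨t, ht⟩ := hp
          simp at ht
          exact absurd (ht.1 ▸ List.mem_cons_self) hc
      · exact Or.inr hi
    | cons x a' ih =>
      rcases List.infix_cons_iff.mp h with hp | hi
      · cases m with
        | nil => exact absurd rfl hm
        | cons y m' =>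
          obtain ⟨t, ht⟩ := hp
          simp at ht
          have hm' : m' <+: a' ++ c :: b := ⟨t, ht.2⟩
          have := pfx_split m' a' b c (fun hx => hc (List.mem_cons_of_mem _ hx)) hm'
          rw [ht.1]
          exact Or.inl ((List.prefix_cons_inj x).mpr this).isInfix
      · rcases ih hi with h1 | h2
        · exact Or.inl (h1.trans (List.suffix_cons x a').isInfix)
        · exact Or.inr h2
  · rintro (h | h)
    · exact h.trans ⟨[], c :: b, by simp⟩
    · exact h.trans ⟨a ++ [c], [], by simp⟩

-- a nonempty marker avoiding the separator is an infix of the joined text iff it is an infix of some part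
lemma infix_intercalate (m : List Char) (c : Char) (hm : m ≠ []) (hc : c ∉ m) :
    ∀ ls : List (List Char), m <:+: List.intercalate [c] ls ↔ ∃ l ∈ ls, m <:+: l
  | [] => by
    simp [List.intercalate]
    intro h; exact absurd h hm
  | [a] => by simp [List.intercalate]
  | a :: b :: rest => by
    have hstep : List.intercalate [c] (a :: b :: rest) = a ++ c :: List.intercalate [c] (b :: rest) := by
      simp [List.intercalate, List.intersperse]
    rw [hstep, infix_split m a _ c hm hc, infix_intercalate m c hm hc (b :: rest)]
    simp

-- PySem.Chars.join is List.intercalate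
lemma chars_join_eq (sep : List Char) (ls : List (List Char)) :
    PySem.Chars.join sep ls = List.intercalate sep ls := rfl

-- B's single-text scan for one marker equals the per-line scan
lemma isIn_join (m : String) (hm : m.toList ≠ []) (hc : '\n' ∉ m.toList) (lines : List String) :
    PySem.Str.isIn m (PySem.Str.join "\n" (lines.map (fun raw => PySem.Str.lower raw)))
      = lines.any (fun raw => PySem.Str.isIn m (PySem.Str.lower raw)) := by
  rw [Bool.eq_iff_iff, PySem.Str.isIn_iff_infix, PySem.Str.toList_join, List.map_map]
  have : (String.toList ∘ fun raw => PySem.Str.lower raw)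
      = fun raw => PySem.Chars.lower raw.toList := by
    funext raw; simp [PySem.Str.toList_lower]
  rw [this, chars_join_eq]
  have hsep : ("\n" : String).toList = ['\n'] := rfl
  rw [hsep, infix_intercalate m.toList '\n' hm hc]
  simp only [List.any_eq_true, List.mem_map]
  constructor
  · rintro ⟨l, ⟨raw, hraw, rfl⟩, hl⟩
    exact ⟨raw, hraw, by rw [PySem.Str.isIn_iff_infix, PySem.Str.toList_lower]; exact hl⟩
  · rintro ⟨raw, hraw, h⟩
    rw [PySem.Str.isIn_iff_infix, PySem.Str.toList_lower] at h
    exact ⟨PySem.Chars.lower raw.toList, ⟨raw, hraw, rfl⟩, h⟩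

-- A's loop is List.any
lemma goA_eq_any (lines : List String) :
    goA lines = lines.any (fun raw => pvMarkers.any (fun marker => PySem.Str.isIn marker (PySem.Str.lower raw))) := by
  induction lines with
  | nil => rfl
  | cons raw rest ih =>
    show (if pvMarkers.any (fun marker => PySem.Str.isIn marker (PySem.Str.lower raw)) then true
      else goA rest) = _
    rw [List.any_cons, ih]
    cases pvMarkers.any (fun marker => PySem.Str.isIn marker (PySem.Str.lower raw)) <;> simp

-- Bool any is determined by its values on the list's members
lemma any_congr_mem {α : Type} (l : List α) (p q : α → Bool) (h : ∀ a ∈ l, p a = q a) :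
    l.any p = l.any q := by
  induction l with
  | nil => rfl
  | cons a l ih =>
    simp only [List.any_cons, h a List.mem_cons_self,
      ih (fun b hb => h b (List.mem_cons_of_mem a hb))]

-- every marker is nonempty and newline-free
lemma markers_ok : ∀ m ∈ pvMarkers, m.toList ≠ [] ∧ '\n' ∉ m.toList := by decide

-- ===== VERDICT (by name: the statement is the Claim_ definition above) =====
theorem has_browser_evidence_py_spec : Claim_equal_has_browser_evidence_py := by
  intro lines _
  unfold Spec_has_browser_evidence_py has_browser_evidence_py has_browser_evidence_py_alt
  have halt : pvMarkers.any (fun marker =>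
      PySem.Str.isIn marker (PySem.Str.join "\n" (lines.map (fun raw => PySem.Str.lower raw))))
      = pvMarkers.any (fun marker =>
        lines.any (fun raw => PySem.Str.isIn marker (PySem.Str.lower raw))) := by
    apply any_congr_mem
    intro m hm
    exact isIn_join m (markers_ok m hm).1 (markers_ok m hm).2 lines
  match lines with
  | [] => decide
  | x :: xs =>
    rw [goA_eq_any]
    simp only [halt]
    rw [Bool.eq_iff_iff]
    simp only [List.any_eq_true]
    exact ⟨fun ⟨r, hr, m, hm, h⟩ => ⟨m, hm, r, hr, h⟩, fun ⟨m, hm, r, hr, h⟩ => ⟨r, hr, m, hm, h⟩⟩
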